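-- pv_equiv track=rewrite | github.com/CaptainMills78/Classwork-Year-1-Term-1---2 | Others/Records/Questions/Q5.py | define_grid
-- ===== SOURCE A (Python) =====
-- def define_grid(baseA, o_coord_x, o_coord_y):
--     for y in range(len(baseA)):
--         for x in range(len(baseA[y])):
--             if o_coord_x-1 == x and o_coord_y-1 == y:
--                 baseA[y][x] = "O"
--             else:
--                 baseA[y][x] = "x"
--     return baseA
-- ===== SOURCE B (Python) =====
-- def define_grid(baseA, o_coord_x, o_coord_y):
--     for row in baseA:
--         row[:] = ["x"] * len(row)
--     if 1 <= o_coord_y <= len(baseA) and 1 <= o_coord_x <= len(baseA[o_coord_y - 1]):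
--         baseA[o_coord_y - 1][o_coord_x - 1] = "O"
--     return baseA
-- ===== Notes on version B (the rewrite author's own statement) =====
-- stated objective: simpler
-- what changed: Replaces the per-cell branch inside the nested loops by a plain fill-every-row-with-'x' pass followed by one bounds-checked assignment of the single 'O' cell.
import Mathlib
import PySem

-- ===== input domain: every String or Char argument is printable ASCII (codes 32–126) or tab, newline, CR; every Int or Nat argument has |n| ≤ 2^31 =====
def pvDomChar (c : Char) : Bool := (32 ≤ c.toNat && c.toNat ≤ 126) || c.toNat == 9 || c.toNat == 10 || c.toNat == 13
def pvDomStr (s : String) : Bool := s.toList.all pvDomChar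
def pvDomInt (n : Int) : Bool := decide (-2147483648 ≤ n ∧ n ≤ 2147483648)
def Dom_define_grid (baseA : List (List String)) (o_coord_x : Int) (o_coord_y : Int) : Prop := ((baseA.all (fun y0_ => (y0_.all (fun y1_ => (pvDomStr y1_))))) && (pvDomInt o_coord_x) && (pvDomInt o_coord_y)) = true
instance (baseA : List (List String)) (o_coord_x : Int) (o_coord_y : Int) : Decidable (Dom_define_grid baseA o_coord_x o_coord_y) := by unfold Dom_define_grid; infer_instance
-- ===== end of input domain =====

-- B replaces the per-cell branch inside A's nested loops by a fill-all-'x' pass plus one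
-- bounds-checked assignment of the 'O' cell; equivalence is about the RETURN value only
-- (both Pythons also mutate baseA in place the same way).

-- ===== PORT A =====
-- nested loops over y in range(len(baseA)), x in range(len(baseA[y])), rewriting each cell
def define_grid (baseA : List (List String)) (o_coord_x : Int) (o_coord_y : Int) : List (List String) :=
  baseA.mapIdx (fun y row =>
    row.mapIdx (fun x _ =>
      if o_coord_x - 1 = (x : Int) ∧ o_coord_y - 1 = (y : Int) then "O" else "x"))

-- ===== PORT B =====
def define_grid_alt (baseA : List (List String)) (o_coord_x : Int) (o_coord_y : Int) : List (List String) :=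
  let g := baseA.map (fun row => List.replicate row.length "x")
  if 1 ≤ o_coord_y ∧ o_coord_y ≤ (baseA.length : Int) ∧
     1 ≤ o_coord_x ∧ o_coord_x ≤ (((baseA.getD (o_coord_y - 1).toNat []).length : Int)) then
    g.set (o_coord_y - 1).toNat ((g.getD (o_coord_y - 1).toNat []).set (o_coord_x - 1).toNat "O")
  else g

-- ===== PRECONDITION & SPEC =====
def Spec_define_grid (baseA : List (List String)) (o_coord_x : Int) (o_coord_y : Int) (out : List (List String)) : Prop := out = define_grid_alt baseA o_coord_x o_coord_y
instance (baseA : List (List String)) (o_coord_x : Int) (o_coord_y : Int) (out : List (List String)) : Decidable (Spec_define_grid baseA o_coord_x o_coord_y out) := by unfold Spec_define_grid; infer_instance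

-- ===== CLAIM (what is proved, stated in full; the proofs are below) =====
def Claim_equal_define_grid : Prop := ∀ (baseA : List (List String)) (o_coord_x : Int) (o_coord_y : Int), Dom_define_grid baseA o_coord_x o_coord_y → Spec_define_grid baseA o_coord_x o_coord_y (define_grid baseA o_coord_x o_coord_y)

-- ===== LEMMAS AND PROOFS =====

-- the row A produces when the 'O' condition never fires on this row: all "x"
theorem row_all_x (row : List String) (ox oy : Int) (y : Nat)
    (h : ∀ x : Nat, x < row.length → ¬ (ox - 1 = (x : Int) ∧ oy - 1 = (y : Int))) :
    row.mapIdx (fun x _ => if ox - 1 = (x : Int) ∧ oy - 1 = (y : Int) then "O" else "x") =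
      List.replicate row.length "x" := by
  apply List.ext_getElem
  · simp
  · intro i h1 h2
    simp only [List.getElem_mapIdx, List.getElem_replicate]
    rw [if_neg (h i (by simpa using h1))]

theorem main_equiv (baseA : List (List String)) (o_coord_x : Int) (o_coord_y : Int) :
    define_grid baseA o_coord_x o_coord_y = define_grid_alt baseA o_coord_x o_coord_y := by
  unfold define_grid define_grid_alt
  split
  next hin =>
    obtain ⟨hy1, hy2, hx1, hx2⟩ := hin
    apply List.ext_getElem
    · simp
    · intro y hyA hyB
      simp only [List.getElem_mapIdx]
      by_cases hy : (o_coord_y - 1).toNat = y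
      · subst hy
        have hylen : (o_coord_y - 1).toNat < baseA.length := by simpa using hyA
        rw [List.getElem_set_self (by simpa using hylen)]
        have hrow : baseA.getD (o_coord_y - 1).toNat [] = baseA[(o_coord_y - 1).toNat] :=
          List.getD_eq_getElem _ _ hylen
        have hg : (baseA.map (fun row => List.replicate row.length "x")).getD
            (o_coord_y - 1).toNat [] = List.replicate (baseA[(o_coord_y - 1).toNat].length) "x" := by
          rw [List.getD_eq_getElem _ _ (by simpa using hylen), List.getElem_map]
        rw [hg]
        apply List.ext_getElem
        · simp
        · intro x hx hx'
          simp only [List.getElem_mapIdx]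
          rw [List.getElem_set]
          have hxlen : x < baseA[(o_coord_y - 1).toNat].length := by simpa using hx
          split
          next hxo =>
            rw [if_pos (show (o_coord_x - 1).toNat = x by omega)]
          next hxo =>
            rw [if_neg (show ¬ (o_coord_x - 1).toNat = x by
              intro h; exact hxo ⟨by omega, by omega⟩), List.getElem_replicate]
      · have hylen : y < baseA.length := by simpa using hyA
        rw [List.getElem_set_ne (by simpa using hy), List.getElem_map]
        apply row_all_x
        intro x _
        rintro ⟨_, h2⟩
        exact hy (by omega)
  next hin =>
    apply List.ext_getElem
    · simp
    · intro y hyA hyB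
      simp only [List.getElem_mapIdx, List.getElem_map]
      have hylen : y < baseA.length := by simpa using hyA
      apply row_all_x
      intro x hxlen
      rintro ⟨h1, h2⟩
      apply hin
      refine ⟨by omega, by omega, by omega, ?_⟩
      have hget : baseA.getD (o_coord_y - 1).toNat [] = baseA[y] := by
        have hi : (o_coord_y - 1).toNat = y := by omega
        rw [hi]; exact List.getD_eq_getElem _ _ hylen
      rw [hget]; omega

-- ===== VERDICT (by name: the statement is the Claim_ definition above) =====
theorem define_grid_spec : Claim_equal_define_grid := by
  intro baseA ox oy _
  exact main_equiv baseA ox oy
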